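-- pv_equiv track=rewrite | github.com/R-Schafer/learning | practice_problems/list_practice.py | find_streak
-- ===== SOURCE A (Python) =====
-- def find_streak(flips, streak):
--     counter = 1
--     prev_letter = None
--
--     for letter in flips:
--         if prev_letter == None:
--             prev_letter = letter
--
--         elif letter == prev_letter:
--             counter += 1
--             if counter == streak:
--                 return True
--         else:
--             counter = 1
--
--         prev_letter = letter
--     return False
-- ===== SOURCE B (Python) =====
-- def find_streak(flips, streak):
--     # Staged passes over run boundaries instead of a streaming counter:
--     # collect the indices where the value changes, then test the gap sizes.
--     if streak < 1:
--         return False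
--     n = len(flips)
--     breaks = [0] + [i for i in range(1, n) if flips[i] != flips[i - 1]] + [n]
--     return any(b - a >= streak for a, b in zip(breaks, breaks[1:]))
-- ===== Notes on version B (the rewrite author's own statement) =====
-- stated objective: alternative
-- what changed: B builds the list of run-boundary indices (positions where the value changes) in one comprehension and then tests the gaps between consecutive boundaries, instead of A's streaming counter with prev-letter tracking and resets; B also returns True for streak == 1 on nonempty input (see differs).
-- intended difference: For streak == 1 with nonempty flips A returns False (its counter starts at 1 and is compared to streak only after an increment, so it can never hit 1), while B returns True, which is the intended value since any single element is a run of length 1. — e.g. on find_streak(["H"], 1): A returns false, B returns true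
import Mathlib
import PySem

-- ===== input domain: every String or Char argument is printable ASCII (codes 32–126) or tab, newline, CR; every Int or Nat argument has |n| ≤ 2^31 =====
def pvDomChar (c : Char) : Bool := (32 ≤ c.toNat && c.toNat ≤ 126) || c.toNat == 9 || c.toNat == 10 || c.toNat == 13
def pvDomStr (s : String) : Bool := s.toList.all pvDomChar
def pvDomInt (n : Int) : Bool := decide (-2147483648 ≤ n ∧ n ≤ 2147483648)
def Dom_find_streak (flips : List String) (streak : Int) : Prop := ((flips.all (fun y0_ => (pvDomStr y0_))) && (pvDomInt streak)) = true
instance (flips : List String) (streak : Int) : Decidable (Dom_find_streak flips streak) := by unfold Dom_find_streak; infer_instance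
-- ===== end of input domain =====

-- One honest line: B finds the indices where the value changes (the run boundaries) in one
-- comprehension and then tests the boundary gaps, instead of A's streaming counter with
-- prev-letter tracking; B returns True for streak == 1 on nonempty input where A
-- accidentally returns False (stated as D_ below).

-- ===== PORT A =====
-- A's for-loop over `flips` with state (counter, prev_letter); `prev_letter == None`
-- only holds before the first iteration (strings never equal None).
def pvLoopA (streak : Int) : List String → Int → Option String → Bool
  | [], _, _ => false
  | letter :: rest, counter, prev =>
    match prev with
    | none => pvLoopA streak rest counter (some letter)
    | some p =>
      if letter == p then
        if counter + 1 == streak then true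
        else pvLoopA streak rest (counter + 1) (some letter)
      else pvLoopA streak rest 1 (some letter)

def find_streak (flips : List String) (streak : Int) : Bool :=
  pvLoopA streak flips 1 none

-- ===== PORT B =====
-- Source B: guard, then breaks = [0] + [i for i in range(1, n) if flips[i] != flips[i-1]] + [n],
-- then any(b - a >= streak for a, b in zip(breaks, breaks[1:])).
-- Indices i, i-1 are in range 0..n-1, so pyGetD with a default is exact for flips[i].
def find_streak_alt (flips : List String) (streak : Int) : Bool :=
  if streak < 1 then false
  else
    let n : Int := (flips.length : Int)
    let breaks : List Int :=
      [0] ++ (PySem.List.pyRange 1 n 1).filter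
        (fun i => !(PySem.List.pyGetD flips i "" == PySem.List.pyGetD flips (i - 1) "")) ++ [n]
    (breaks.zip (PySem.List.slice breaks (some 1) none)).any
      (fun ab => streak ≤ ab.2 - ab.1)

-- ===== PRECONDITION & SPEC =====
-- For streak == 1 with nonempty flips A returns False (its counter starts at 1 and is
-- compared to streak only after an increment, so it can never hit 1), while B returns
-- True, the intended value: any single element is a run of length 1.
def D_find_streak (flips : List String) (streak : Int) : Prop := flips ≠ [] ∧ streak = 1
instance (flips : List String) (streak : Int) : Decidable (D_find_streak flips streak) := by unfold D_find_streak; infer_instance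

def Spec_find_streak (flips : List String) (streak : Int) (out : Bool) : Prop := ¬ D_find_streak flips streak → out = find_streak_alt flips streak
instance (flips : List String) (streak : Int) (out : Bool) : Decidable (Spec_find_streak flips streak out) := by unfold Spec_find_streak; infer_instance

def pvDiffWitness_find_streak : List String × Int := (["H"], 1)
def pvDiffWitnessOut_find_streak : Bool × Bool := (false, true)

-- ===== CLAIM (what is proved, stated in full; the proofs are below) =====
def Claim_unchanged_find_streak : Prop := ∀ (flips : List String) (streak : Int), Dom_find_streak flips streak → Spec_find_streak flips streak (find_streak flips streak)
def Claim_changed_find_streak : Prop := Dom_find_streak (pvDiffWitness_find_streak.1) (pvDiffWitness_find_streak.2) ∧ D_find_streak (pvDiffWitness_find_streak.1) (pvDiffWitness_find_streak.2) ∧ find_streak (pvDiffWitness_find_streak.1) (pvDiffWitness_find_streak.2) = pvDiffWitnessOut_find_streak.1 ∧ find_streak_alt (pvDiffWitness_find_streak.1) (pvDiffWitness_find_streak.2) = pvDiffWitnessOut_find_streak.2 ∧ pvDiffWitnessOut_find_streak.1 ≠ pvDiffWitnessOut_find_streak.2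
def Claim_exact_find_streak : Prop := ∀ (flips : List String) (streak : Int), Dom_find_streak flips streak → D_find_streak flips streak → find_streak flips streak ≠ find_streak_alt flips streak

-- ===== LEMMAS AND PROOFS =====

-- proof-layer view shared by both sides: maximal-run lengths
def pvRunLen (head : String) : List String → Nat
  | [] => 0
  | x :: xs => if x == head then pvRunLen head xs + 1 else 0

-- run-by-run check: test each maximal run's length, skip past it
def pvLoopB (streak : Int) : List String → Bool
  | [] => false
  | x :: xs =>
    if streak ≤ ((pvRunLen x xs + 1 : Nat) : Int) then true
    else pvLoopB streak (xs.drop (pvRunLen x xs))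
  termination_by l => l.length
  decreasing_by simp only [List.length_drop, List.length_cons]; omega

theorem pvLoopB_nil (streak : Int) : pvLoopB streak [] = false := by
  simp [pvLoopB]

theorem pvLoopB_cons (streak : Int) (x : String) (xs : List String) :
    pvLoopB streak (x :: xs) =
      (if streak ≤ ((pvRunLen x xs + 1 : Nat) : Int) then true
       else pvLoopB streak (xs.drop (pvRunLen x xs))) := by
  simp [pvLoopB]

theorem pvRunLen_le_length (x : String) (xs : List String) : pvRunLen x xs ≤ xs.length := by
  induction xs with
  | nil => simp [pvRunLen]
  | cons y ys ih =>
    simp only [pvRunLen, List.length_cons]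
    split_ifs <;> omega

-- inside the run everything equals the head
theorem pvRunLen_prefix (x : String) (xs : List String) :
    ∀ j, j < pvRunLen x xs → xs[j]? = some x := by
  induction xs with
  | nil => intro j hj; simp [pvRunLen] at hj
  | cons y ys ih =>
    intro j hj
    simp only [pvRunLen] at hj
    by_cases hyx : (y == x) = true
    · have hy : y = x := by simpa using hyx
      rw [hyx, if_pos rfl] at hj
      cases j with
      | zero => simp [hy]
      | succ k => simpa using ih k (by omega)
    · rw [if_neg hyx] at hj; omega

-- the run is maximal: the next element differs
theorem pvRunLen_stop (x : String) (xs : List String) (h : pvRunLen x xs < xs.length) :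
    xs[pvRunLen x xs]? ≠ some x := by
  induction xs with
  | nil => simp at h
  | cons y ys ih =>
    simp only [pvRunLen] at h ⊢
    by_cases hyx : (y == x) = true
    · rw [hyx, if_pos rfl] at h ⊢
      simpa using ih (by simpa using Nat.lt_of_succ_lt_succ (by simpa using h))
    · rw [if_neg hyx] at h ⊢
      simp only [List.getElem?_cons_zero]
      intro hy
      injection hy with hy'
      exact hyx (by simp [hy'])

-- gap scan over the break list (the zip-any of Source B, prev = last break seen)
def pvGap (streak n : Int) : Int → List Int → Bool
  | prev, [] => decide (streak ≤ n - prev)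
  | prev, b :: t => decide (streak ≤ b - prev) || pvGap streak n b t

-- zip(breaks, breaks[1:]) against 0 :: brs ++ [n] is exactly pvGap
theorem pvGap_zip (streak n : Int) :
    ∀ (brs : List Int) (c : Int),
      (((c :: (brs ++ [n])).zip (brs ++ [n])).any (fun ab => decide (streak ≤ ab.2 - ab.1)))
        = pvGap streak n c brs := by
  intro brs
  induction brs with
  | nil => intro c; simp [pvGap]
  | cons b t ih =>
    intro c
    simp only [List.cons_append, List.zip_cons_cons, List.any_cons, pvGap]
    rw [← ih b]

theorem find_streak_tail_eq (flips : List String) (a : Nat)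
    (x : String) (xs : List String) (hd : flips.drop a = x :: xs) :
    flips.drop (a + 1) = xs := by
  have := congrArg List.tail hd
  simpa [List.tail_drop] using this

-- elements of the run, seen through the whole list: flips[a + d] = x for d ≤ run length
theorem run_getD (flips : List String) (a : Nat) (x : String) (xs : List String)
    (hd : flips.drop a = x :: xs) (d : Nat) (hdr : d ≤ pvRunLen x xs) :
    flips.getD (a + d) "" = x := by
  have hlen : xs.length + 1 = flips.length - a := by
    have := congrArg List.length hd
    simp only [List.length_drop, List.length_cons] at this
    omega
  have hr := pvRunLen_le_length x xs
  have hin : a + d < flips.length := by omega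
  have hq : flips[a + d]? = (x :: xs)[d]? := by
    rw [← hd, List.getElem?_drop]
  rw [List.getD_eq_getElem?_getD, hq]
  cases d with
  | zero => simp
  | succ k =>
    have := pvRunLen_prefix x xs k (by omega)
    simp only [List.getElem?_cons_succ, this, Option.getD_some]

-- the element right after the run differs from the run's value
theorem run_stop_getD (flips : List String) (a : Nat) (x : String) (xs : List String)
    (hd : flips.drop a = x :: xs) (hlt : a + 1 + pvRunLen x xs < flips.length) :
    flips.getD (a + 1 + pvRunLen x xs) "" ≠ x := by
  have hlen : xs.length + 1 = flips.length - a := by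
    have := congrArg List.length hd
    simp only [List.length_drop, List.length_cons] at this
    omega
  set r := pvRunLen x xs with hr
  have hrx : r < xs.length := by omega
  have hq : flips[a + 1 + r]? = (x :: xs)[1 + r]? := by
    rw [← hd, List.getElem?_drop]
    congr 1
    omega
  have hq2 : (x :: xs)[1 + r]? = xs[r]? := by
    have : 1 + r = r + 1 := by omega
    rw [this, List.getElem?_cons_succ]
  have hstop := pvRunLen_stop x xs hrx
  rw [List.getD_eq_getElem?_getD, hq, hq2, List.getElem?_eq_getElem hrx, Option.getD_some]
  intro hcontra
  exact hstop (by rw [List.getElem?_eq_getElem hrx, hcontra])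

-- the break-index comprehension, one maximal run at a time
theorem filter_run_step (flips : List String) (a : Nat) (x : String) (xs : List String)
    (hd : flips.drop a = x :: xs) :
    ((PySem.List.pyRange ((a : Int) + 1) (flips.length : Int) 1).filter
        (fun i => !(PySem.List.pyGetD flips i "" == PySem.List.pyGetD flips (i - 1) "")))
      = (if a + 1 + pvRunLen x xs < flips.length
          then ((a + 1 + pvRunLen x xs : Nat) : Int) ::
            ((PySem.List.pyRange (((a + 1 + pvRunLen x xs : Nat) : Int) + 1) (flips.length : Int) 1).filter
              (fun i => !(PySem.List.pyGetD flips i "" == PySem.List.pyGetD flips (i - 1) "")))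
          else []) := by
  set n := flips.length with hn
  set r := pvRunLen x xs with hrdef
  have hlen : xs.length + 1 = n - a := by
    have := congrArg List.length hd
    simp only [List.length_drop, List.length_cons] at this
    omega
  have ha : a < n := by omega
  have hr := pvRunLen_le_length x xs
  have hbound : a + 1 + r ≤ n := by omega
  -- split the range at the end of the run
  rw [PySem.List.pyRange_one_append ((a : Int) + 1) ((a + 1 + r : Nat) : Int) (n : Int)
      (by push_cast; omega) (by push_cast; omega), List.filter_append]
  -- inside the run: no break
  have hnil : ((PySem.List.pyRange ((a : Int) + 1) ((a + 1 + r : Nat) : Int) 1).filter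
      (fun i => !(PySem.List.pyGetD flips i "" == PySem.List.pyGetD flips (i - 1) ""))) = [] := by
    rw [List.filter_eq_nil_iff]
    intro j hj
    rw [PySem.List.mem_pyRange_one] at hj
    obtain ⟨hj1, hj2⟩ := hj
    have hd0 : 1 ≤ j - (a : Int) ∧ j - (a : Int) ≤ (r : Int) := by push_cast at hj2; omega
    set d := (j - (a : Int)).toNat with hdd
    have hjq : j = ((a + d : Nat) : Int) := by push_cast; omega
    have hd1 : 1 ≤ d ∧ d ≤ r := by omega
    have e1 : PySem.List.pyGetD flips j "" = x := by
      rw [hjq, PySem.List.pyGetD_natCast]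
      exact run_getD flips a x xs hd d (by omega)
    have e2 : PySem.List.pyGetD flips (j - 1) "" = x := by
      have : j - 1 = ((a + (d - 1) : Nat) : Int) := by push_cast; omega
      rw [this, PySem.List.pyGetD_natCast]
      exact run_getD flips a x xs hd (d - 1) (by omega)
    simp [e1, e2]
  rw [hnil, List.nil_append]
  by_cases hcase : a + 1 + r < n
  · have e1 : PySem.List.pyGetD flips ((a + 1 + r : Nat) : Int) "" ≠ x := by
      rw [PySem.List.pyGetD_natCast]
      exact run_stop_getD flips a x xs hd (by omega)
    have e2 : PySem.List.pyGetD flips (((a + 1 + r : Nat) : Int) - 1) "" = x := by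
      have : ((a + 1 + r : Nat) : Int) - 1 = ((a + r : Nat) : Int) := by push_cast; omega
      rw [this, PySem.List.pyGetD_natCast]
      exact run_getD flips a x xs hd r (by omega)
    have hcond : (!(PySem.List.pyGetD flips ((a + 1 + r : Nat) : Int) ""
        == PySem.List.pyGetD flips (((a + 1 + r : Nat) : Int) - 1) "")) = true := by
      rw [e2]
      simpa using e1
    rw [if_pos hcase, PySem.List.pyRange_one_cons (by push_cast; omega)]
    simp only [List.filter_cons, hcond, if_true]
  · have : a + 1 + r = n := by omega
    rw [if_neg hcase, this, PySem.List.pyRange_one_eq_nil (by omega)]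
    rfl

-- the gap scan over break indices is the run-by-run check on the remaining suffix
theorem pvGap_eq_pvLoopB (flips : List String) (streak : Int) (hs : 1 ≤ streak) :
    ∀ (m a : Nat), flips.length - a ≤ m →
      pvGap streak (flips.length : Int) (a : Int)
          ((PySem.List.pyRange ((a : Int) + 1) (flips.length : Int) 1).filter
            (fun i => !(PySem.List.pyGetD flips i "" == PySem.List.pyGetD flips (i - 1) "")))
        = pvLoopB streak (flips.drop a) := by
  intro m
  induction m with
  | zero =>
    intro a ha
    rw [PySem.List.pyRange_one_eq_nil (by omega),
        List.drop_eq_nil_of_le (by omega), pvLoopB_nil]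
    simp only [pvGap, List.filter_nil]
    rw [decide_eq_false]
    omega
  | succ m ih =>
    intro a ha
    by_cases han : a < flips.length
    · obtain ⟨x, xs, hd⟩ : ∃ x xs, flips.drop a = x :: xs := by
        cases h : flips.drop a with
        | nil => exfalso; have := congrArg List.length h; simp at this; omega
        | cons y ys => exact ⟨y, ys, rfl⟩
      have hlen : xs.length + 1 = flips.length - a := by
        have := congrArg List.length hd
        simp only [List.length_drop, List.length_cons] at this
        omega
      have hr := pvRunLen_le_length x xs
      rw [filter_run_step flips a x xs hd, hd, pvLoopB_cons]
      set r := pvRunLen x xs with hrdef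
      have hdrop : xs.drop r = flips.drop (a + 1 + r) := by
        rw [← find_streak_tail_eq flips a x xs hd, List.drop_drop]
      by_cases hcase : a + 1 + r < flips.length
      · rw [if_pos hcase]
        simp only [pvGap]
        rw [ih (a + 1 + r) (by omega), hdrop]
        by_cases hhit : streak ≤ ((r + 1 : Nat) : Int)
        · rw [if_pos hhit, decide_eq_true (by push_cast at hhit ⊢; omega), Bool.true_or]
        · rw [if_neg hhit, decide_eq_false (by push_cast at hhit ⊢; omega), Bool.false_or]
      · have hend : a + 1 + r = flips.length := by omega
        rw [if_neg hcase]
        simp only [pvGap]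
        have hxs : xs.drop r = [] := by
          apply List.drop_eq_nil_of_le; omega
        rw [hxs, pvLoopB_nil]
        by_cases hhit : streak ≤ ((r + 1 : Nat) : Int)
        · rw [if_pos hhit, decide_eq_true (by push_cast at hhit ⊢; omega)]
        · rw [if_neg hhit, decide_eq_false (by push_cast at hhit ⊢; omega)]
    · rw [PySem.List.pyRange_one_eq_nil (by omega),
          List.drop_eq_nil_of_le (by omega), pvLoopB_nil]
      simp only [pvGap, List.filter_nil]
      rw [decide_eq_false]
      omega

-- B's port, reduced to the run-by-run check
theorem find_streak_alt_eq (flips : List String) (streak : Int) :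
    find_streak_alt flips streak = (if streak < 1 then false else pvLoopB streak flips) := by
  unfold find_streak_alt
  by_cases h : streak < 1
  · rw [if_pos h, if_pos h]
  · rw [if_neg h, if_neg h]
    simp only []
    rw [PySem.List.slice_from_one]
    have hshape : ([(0 : Int)] ++ (PySem.List.pyRange 1 (flips.length : Int) 1).filter
        (fun i => !(PySem.List.pyGetD flips i "" == PySem.List.pyGetD flips (i - 1) "")) ++ [(flips.length : Int)])
      = (0 : Int) :: (((PySem.List.pyRange 1 (flips.length : Int) 1).filter
        (fun i => !(PySem.List.pyGetD flips i "" == PySem.List.pyGetD flips (i - 1) ""))) ++ [(flips.length : Int)]) := by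
      simp
    rw [hshape, List.tail_cons, pvGap_zip streak (flips.length : Int) _ 0]
    have h0 : ((0 : Nat) : Int) = (0 : Int) := rfl
    have := pvGap_eq_pvLoopB flips streak (by omega) flips.length 0 (by omega)
    rw [h0] at this
    simpa using this

-- A can only answer True after incrementing counter to at least 2, so streak ≤ 1 is never hit.
theorem pvLoopA_low (streak : Int) (hs : streak ≤ 1) :
    ∀ (xs : List String) (c : Int) (p : Option String), 1 ≤ c → pvLoopA streak xs c p = false := by
  intro xs
  induction xs with
  | nil => intro c p _; rfl
  | cons x rest ih =>
    intro c p hc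
    cases p with
    | none => exact ih c (some x) hc
    | some q =>
      simp only [pvLoopA]
      by_cases hxq : (x == q) = true
      · have h2 : (c + 1 == streak) = false := by
          simp only [beq_eq_false_iff_ne]; omega
        simp only [hxq, h2, if_true, Bool.false_eq_true, if_false]
        exact ih (c + 1) (some x) (by omega)
      · simp only [Bool.not_eq_true] at hxq
        simp only [hxq, Bool.false_eq_true, if_false]
        exact ih 1 (some x) (by omega)

-- Main invariant: with a partial run of length c of letter p already counted,
-- A behaves like "answer True if the continuing run reaches streak, else B on the rest".
theorem pvLoopA_eq (streak : Int) (hs : 2 ≤ streak) :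
    ∀ (xs : List String) (c : Int) (p : String), 1 ≤ c → c < streak →
      pvLoopA streak xs c (some p) =
        (if streak ≤ (pvRunLen p xs : Int) + c then true
         else pvLoopB streak (xs.drop (pvRunLen p xs))) := by
  intro xs
  induction xs with
  | nil =>
    intro c p hc1 hcs
    rw [show pvRunLen p [] = 0 from rfl]
    rw [if_neg (by push_cast; omega)]
    simp [pvLoopA, pvLoopB_nil]
  | cons x rest ih =>
    intro c p hc1 hcs
    by_cases hxp : (x == p) = true
    · have hxp' : x = p := by simpa using hxp
      subst hxp'
      have hrun : pvRunLen x (x :: rest) = pvRunLen x rest + 1 := by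
        simp [pvRunLen]
      rw [hrun, List.drop_succ_cons]
      simp only [pvLoopA, BEq.rfl, if_true]
      by_cases hhit : c + 1 = streak
      · have hb : (c + 1 == streak) = true := by simpa using hhit
        rw [hb]
        simp only [if_true]
        rw [if_pos (by push_cast; omega)]
      · have hb : (c + 1 == streak) = false := by simpa using hhit
        rw [hb]
        simp only [Bool.false_eq_true, if_false]
        rw [ih (c + 1) x (by omega) (by omega)]
        by_cases h : streak ≤ (pvRunLen x rest : Int) + (c + 1)
        · rw [if_pos h, if_pos (by push_cast at h ⊢; omega)]
        · rw [if_neg h, if_neg (by push_cast at h ⊢; omega)]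
    · simp only [Bool.not_eq_true] at hxp
      have hrun : pvRunLen p (x :: rest) = 0 := by
        simp [pvRunLen, hxp]
      rw [hrun, List.drop_zero]
      rw [if_neg (by push_cast; omega)]
      simp only [pvLoopA]
      rw [hxp]
      simp only [Bool.false_eq_true, if_false]
      rw [ih 1 x (by omega) (by omega), pvLoopB_cons]
      by_cases h : streak ≤ (pvRunLen x rest : Int) + 1
      · rw [if_pos h, if_pos (by push_cast at h ⊢; omega)]
      · rw [if_neg h, if_neg (by push_cast at h ⊢; omega)]

theorem pvLoopB_one (x : String) (xs : List String) : pvLoopB 1 (x :: xs) = true := by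
  rw [pvLoopB_cons]
  rw [if_pos (by push_cast; omega)]

-- ===== VERDICT (by name: the statement is the Claim_ definition above) =====
theorem find_streak_spec : Claim_unchanged_find_streak := by
  intro flips streak _ hnd
  show find_streak flips streak = find_streak_alt flips streak
  rw [find_streak_alt_eq]
  unfold find_streak
  by_cases hs2 : 2 ≤ streak
  · rw [if_neg (by omega)]
    cases flips with
    | nil => rw [pvLoopB_nil]; rfl
    | cons x xs =>
      simp only [pvLoopA]
      rw [pvLoopA_eq streak hs2 xs 1 x (by omega) (by omega), pvLoopB_cons]
      by_cases h : streak ≤ (pvRunLen x xs : Int) + 1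
      · rw [if_pos h, if_pos (by push_cast at h ⊢; omega)]
      · rw [if_neg h, if_neg (by push_cast at h ⊢; omega)]
  · by_cases h1 : streak = 1
    · have hnil : flips = [] := by
        unfold D_find_streak at hnd
        by_contra hne
        exact hnd ⟨hne, h1⟩
      subst hnil
      rw [if_neg (by omega), pvLoopB_nil]
      rfl
    · rw [if_pos (by omega)]
      cases flips with
      | nil => rfl
      | cons x xs =>
        simp only [pvLoopA]
        exact pvLoopA_low streak (by omega) xs 1 (some x) (by omega)

theorem find_streak_changed : Claim_changed_find_streak := by
  unfold Claim_changed_find_streak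
  refine ⟨by decide, by decide, by decide, ?_, by decide⟩
  show find_streak_alt ["H"] 1 = true
  rw [find_streak_alt_eq]
  rw [if_neg (by omega)]
  exact pvLoopB_one "H" []

theorem find_streak_tight : Claim_exact_find_streak := by
  intro flips streak _ hd
  obtain ⟨hne, hs⟩ := hd
  subst hs
  cases flips with
  | nil => exact absurd rfl hne
  | cons x xs =>
    rw [find_streak_alt_eq]
    unfold find_streak
    rw [if_neg (by omega), pvLoopB_one]
    simp only [pvLoopA]
    rw [pvLoopA_low 1 (by omega) xs 1 (some x) (by omega)]
    simp
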